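-- pv_equiv track=rewrite | github.com/CharlieHasAHeart/DocCollate | proposal/src/proposal_cli/pipeline.py | _chunk_placeholders
-- ===== SOURCE A (Python) =====
-- def _chunk_placeholders(placeholders: list[str], chunk_size: int) -> list[list[str]]:
--     if chunk_size <= 0:
--         chunk_size = 10
--     chunks: list[list[str]] = []
--     cur: list[str] = []
--     for p in placeholders:
--         if not isinstance(p, str) or not p.strip():
--             continue
--         cur.append(p)
--         if len(cur) >= chunk_size:
--             chunks.append(cur)
--             cur = []
--     if cur:
--         chunks.append(cur)
--     return chunks
-- ===== SOURCE B (Python) =====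
-- def _chunk_placeholders(placeholders: list[str], chunk_size: int) -> list[list[str]]:
--     if chunk_size <= 0:
--         chunk_size = 10
--     valid = [p for p in placeholders if isinstance(p, str) and p.strip()]
--     out: list[list[str]] = []
--     while valid:
--         out.append(valid[:chunk_size])
--         valid = valid[chunk_size:]
--     return out
-- ===== Notes on version B (the rewrite author's own statement) =====
-- stated objective: simpler
-- what changed: A's single interleaved loop with a stateful buffer flushed at a threshold is replaced by two passes: filter the valid placeholders once, then split the filtered list by take/drop slicing; the trailing partial chunk falls out of the slicing instead of a final flush.
import Mathlib
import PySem

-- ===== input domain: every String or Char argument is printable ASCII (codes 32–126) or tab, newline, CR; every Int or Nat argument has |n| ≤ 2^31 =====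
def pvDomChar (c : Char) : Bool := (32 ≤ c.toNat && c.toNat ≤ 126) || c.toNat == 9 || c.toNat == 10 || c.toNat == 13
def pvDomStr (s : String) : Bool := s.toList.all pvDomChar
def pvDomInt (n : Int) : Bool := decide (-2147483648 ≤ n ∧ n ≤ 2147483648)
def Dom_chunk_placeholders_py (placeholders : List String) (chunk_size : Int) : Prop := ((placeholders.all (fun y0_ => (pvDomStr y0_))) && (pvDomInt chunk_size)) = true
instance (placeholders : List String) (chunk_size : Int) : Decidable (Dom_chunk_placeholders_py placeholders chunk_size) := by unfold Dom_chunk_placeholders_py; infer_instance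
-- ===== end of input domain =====

-- B replaces A's single stateful buffer-and-flush loop by two passes (filter once, then
-- split the filtered list by slicing); objective: simpler. Same O(n) cost, no speed claim.

-- ===== PORT A =====
-- one iteration of A's for-loop over state (chunks, cur); all inputs are Lean Strings,
-- so Python's `isinstance(p, str)` is always true and only `p.strip()` truthiness remains
def pvStepA (k : Int) (st : List (List String) × List String) (p : String) :
    List (List String) × List String :=
  if PySem.Chars.strip p.toList = [] then st
  else
    let cur := st.2 ++ [p]
    if (cur.length : Int) ≥ k then (st.1 ++ [cur], []) else (st.1, cur)

-- A's trailing `if cur: chunks.append(cur)`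
def pvFlushA (st : List (List String) × List String) : List (List String) :=
  if st.2 ≠ [] then st.1 ++ [st.2] else st.1

def chunk_placeholders_py (placeholders : List String) (chunk_size : Int) : List (List String) :=
  let k := if chunk_size ≤ 0 then (10 : Int) else chunk_size
  pvFlushA (placeholders.foldl (pvStepA k) ([], []))

-- ===== PORT B =====
-- Source B's validity test: p.strip() is truthy
def pvValid (p : String) : Bool := !(PySem.Chars.strip p.toList).isEmpty

-- Source B's while-loop; valid[:k] / valid[k:] are exactly take/drop for the positive k used
-- (PySem.List.slice_to_natCast / slice_from_natCast); the `k = 0` disjunct only makes the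
-- recursion total and is never reached (k ≥ 1 after the guard)
def pvChunkLoop (k : Nat) (valid : List String) (out : List (List String)) : List (List String) :=
  if _h : valid = [] ∨ k = 0 then out
  else pvChunkLoop k (valid.drop k) (out ++ [valid.take k])
termination_by valid.length
decreasing_by
  simp only [not_or] at _h
  have : valid.length ≠ 0 := by simpa [List.length_eq_zero_iff] using _h.1
  simp [List.length_drop]; omega

def chunk_placeholders_py_alt (placeholders : List String) (chunk_size : Int) : List (List String) :=
  let k := if chunk_size ≤ 0 then (10 : Int) else chunk_size
  pvChunkLoop k.toNat (placeholders.filter pvValid) []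

-- ===== PRECONDITION & SPEC =====
def Spec_chunk_placeholders_py (placeholders : List String) (chunk_size : Int) (out : List (List String)) : Prop := out = chunk_placeholders_py_alt placeholders chunk_size
instance (placeholders : List String) (chunk_size : Int) (out : List (List String)) : Decidable (Spec_chunk_placeholders_py placeholders chunk_size out) := by unfold Spec_chunk_placeholders_py; infer_instance

-- ===== CLAIM (what is proved, stated in full; the proofs are below) =====
def Claim_equal_chunk_placeholders_py : Prop := ∀ (placeholders : List String) (chunk_size : Int), Dom_chunk_placeholders_py placeholders chunk_size → Spec_chunk_placeholders_py placeholders chunk_size (chunk_placeholders_py placeholders chunk_size)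

-- ===== LEMMAS AND PROOFS =====

-- invariant of A's loop: flushing the final state equals B's chunking of the pending
-- buffer followed by the valid remainder, with the emitted chunks as accumulator
lemma pv_loop_eq (k : Int) (hk : 0 < k) :
    ∀ (xs : List String) (acc : List (List String)) (cur : List String),
      (cur.length : Int) < k →
      pvFlushA (xs.foldl (pvStepA k) (acc, cur)) =
        pvChunkLoop k.toNat (cur ++ xs.filter pvValid) acc := by
  intro xs
  induction xs with
  | nil =>
    intro acc cur hlt
    by_cases hc : cur = []
    · subst hc
      rw [pvChunkLoop.eq_def]
      simp [pvFlushA]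
    · rw [pvChunkLoop.eq_def]
      have hk0 : k.toNat ≠ 0 := by omega
      have htake : cur.take k.toNat = cur := List.take_of_length_le (by omega)
      have hdrop : cur.drop k.toNat = [] := by
        simp [List.drop_eq_nil_iff]; omega
      simp only [List.filter_nil, List.append_nil, hc, hk0, or_self, dite_false, htake, hdrop]
      rw [pvChunkLoop.eq_def]
      simp [pvFlushA, hc]
  | cons p rest ih =>
    intro acc cur hlt
    by_cases hp : PySem.Chars.strip p.toList = []
    · have hv : pvValid p = false := by simp [pvValid, hp]
      simp only [List.foldl_cons, pvStepA, hp, if_true, List.filter_cons, hv, Bool.false_eq_true,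
        if_false]
      exact ih acc cur hlt
    · have hv : pvValid p = true := by simp [pvValid, hp]
      simp only [List.foldl_cons, pvStepA, hp, if_false, List.filter_cons, hv, if_true]
      by_cases hfull : ((cur ++ [p]).length : Int) ≥ k
      · have hlen : (cur ++ [p]).length = k.toNat := by simp at hfull ⊢; omega
        simp only [hfull, if_true]
        rw [ih (acc ++ [cur ++ [p]]) [] (by simpa using hk)]
        have hne : ¬((cur ++ [p]) ++ rest.filter pvValid = [] ∨ k.toNat = 0) := by
          simp; omega
        have hsplit : cur ++ p :: rest.filter pvValid = (cur ++ [p]) ++ rest.filter pvValid := by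
          simp
        rw [hsplit]
        conv_rhs => rw [pvChunkLoop.eq_def]
        rw [dif_neg hne, ← hlen, List.take_left, List.drop_left]
        simp
      · simp only [hfull, if_false]
        rw [ih acc (cur ++ [p]) (by simpa using lt_of_not_ge hfull)]
        simp

-- ===== VERDICT (by name: the statement is the Claim_ definition above) =====
theorem chunk_placeholders_py_spec : Claim_equal_chunk_placeholders_py := by
  intro placeholders chunk_size _dom
  unfold Spec_chunk_placeholders_py chunk_placeholders_py chunk_placeholders_py_alt
  have hk : 0 < (if chunk_size ≤ 0 then (10 : Int) else chunk_size) := by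
    split_ifs with h <;> omega
  simpa using pv_loop_eq _ hk placeholders [] [] (by simpa using hk)
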